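-- pv_equiv track=rewrite | github.com/kbrosal/12-hour-Python-Challenge | word_occurrence.py | word_occurrence
-- ===== SOURCE A (Python) =====
-- def word_occurrence(sentence, word):
--     # Removing punctuation and making the sentence lowercase
--     cleaned_sentence = ''.join(char for char in sentence if char.isalnum()
--                             or char.isspace()).lower()
--
--     # Alternative
--     cleaned_sentence = ''
--     for char in sentence:
--         if char.isalnum() or char.isspace():
--             cleaned_sentence += char.lower()
--
--     # Splitting the sentence into words
--     words = cleaned_sentence.split()
--
--     # Counting the occurrences of the word
--     count = words.count(word.lower())
--
--     return count
-- ===== SOURCE B (Python) =====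
-- def word_occurrence(sentence, word):
--     # Split first, then clean each token (A cleans the whole string, then splits).
--     target = word.lower()
--     count = 0
--     for token in sentence.split():
--         cleaned = ''.join(ch for ch in token if ch.isalnum()).lower()
--         if cleaned and cleaned == target:
--             count += 1
--     return count
-- ===== Notes on version B (the rewrite author's own statement) =====
-- stated objective: alternative
-- what changed: B splits the raw sentence into whitespace tokens first and cleans/lowercases each token individually (skipping tokens that clean to empty), instead of A's building a cleaned lowercased copy of the whole sentence by repeated string concatenation and then splitting and counting.
import Mathlib
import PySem

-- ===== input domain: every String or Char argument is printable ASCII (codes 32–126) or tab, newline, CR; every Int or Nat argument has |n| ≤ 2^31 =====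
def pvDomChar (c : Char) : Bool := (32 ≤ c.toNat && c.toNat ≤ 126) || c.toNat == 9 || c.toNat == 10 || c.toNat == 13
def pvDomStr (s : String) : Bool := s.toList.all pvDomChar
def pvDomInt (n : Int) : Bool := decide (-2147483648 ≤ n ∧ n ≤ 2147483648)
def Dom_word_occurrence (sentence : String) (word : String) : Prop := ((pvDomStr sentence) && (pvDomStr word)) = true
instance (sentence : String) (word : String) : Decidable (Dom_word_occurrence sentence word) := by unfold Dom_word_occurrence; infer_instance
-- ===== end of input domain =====

-- B cleans each whitespace-split token separately instead of A's cleaning the whole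
-- sentence first and splitting afterwards (objective: alternative decomposition).

-- ===== PORT A =====
-- Python's first assignment to cleaned_sentence is immediately overwritten by the
-- "Alternative" loop; the effective loop is what is ported (on the code-point list).
def word_occurrence (sentence : String) (word : String) : Int :=
  let cleaned : List Char := sentence.toList.foldl
    (fun acc c =>
      if PySem.Chars.isalnum c || PySem.Chars.isspace c then acc ++ [PySem.Chars.lowerChar c]
      else acc) []
  let words := PySem.Chars.split₀ cleaned
  let count := PySem.List.count words (PySem.Chars.lower word.toList)
  (count : Int)

-- ===== PORT B =====
def word_occurrence_alt (sentence : String) (word : String) : Int :=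
  let target := PySem.Chars.lower word.toList
  (PySem.Str.split₀ sentence).foldl
    (fun count token =>
      let cleaned := PySem.Chars.lower (token.toList.filter PySem.Chars.isalnum)
      if !cleaned.isEmpty && cleaned == target then count + 1 else count) 0

-- ===== PRECONDITION & SPEC =====
def Spec_word_occurrence (sentence : String) (word : String) (out : Int) : Prop := out = word_occurrence_alt sentence word
instance (sentence : String) (word : String) (out : Int) : Decidable (Spec_word_occurrence sentence word out) := by unfold Spec_word_occurrence; infer_instance

-- ===== CLAIM (what is proved, stated in full; the proofs are below) =====
def Claim_equal_word_occurrence : Prop := ∀ (sentence : String) (word : String), Dom_word_occurrence sentence word → Spec_word_occurrence sentence word (word_occurrence sentence word)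

-- ===== LEMMAS AND PROOFS =====

-- not-a-space test used for splitting
def pvNs (c : Char) : Bool := !PySem.Chars.isspace c

-- the list of whitespace-separated words of s (reference form of str.split())
def pvWordsOf : List Char → List (List Char)
  | [] => []
  | c :: s =>
      if PySem.Chars.isspace c then pvWordsOf s
      else (c :: s.takeWhile pvNs) :: pvWordsOf (s.dropWhile pvNs)
termination_by s => s.length
decreasing_by
  · simp
  · exact Nat.lt_succ_of_le (List.length_dropWhile_le _ _)

-- B's per-token cleaning
def pvCleanTok (t : List Char) : List Char := (t.filter PySem.Chars.isalnum).map PySem.Chars.lowerChar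

def pvG (t : List Char) : Option (List Char) :=
  if (pvCleanTok t).isEmpty then none else some (pvCleanTok t)

-- A's whole-sentence cleaning, as filter-then-map
def pvCl (s : List Char) : List Char :=
  (s.filter (fun c => PySem.Chars.isalnum c || PySem.Chars.isspace c)).map PySem.Chars.lowerChar

lemma pv_toNat_ofNat (n : Nat) (h : n.isValidChar) : (Char.ofNat n).toNat = n := by
  simp [Char.ofNat, h, Char.ofNatAux, Char.toNat]

lemma pv_isspace_false_of (c : Char) (h1 : 33 ≤ c.toNat) (h2 : c.toNat ≤ 126) :
    PySem.Chars.isspace c = false := by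
  rw [Bool.eq_false_iff]
  intro h
  simp only [PySem.Chars.isspace, Bool.or_eq_true, Bool.and_eq_true, decide_eq_true_eq] at h
  omega

lemma pv_lower_isspace (c : Char) :
    PySem.Chars.isspace (PySem.Chars.lowerChar c) = PySem.Chars.isspace c := by
  simp only [PySem.Chars.lowerChar]
  by_cases h : PySem.Chars.isupper c = true
  · simp only [h, if_true]
    simp only [PySem.Chars.isupper, Bool.and_eq_true, decide_eq_true_eq, Char.le_def,
      UInt32.le_iff_toNat_le_toNat] at h
    have hA : ('A' : Char).val.toNat = 65 := by decide
    have hZ : ('Z' : Char).val.toNat = 90 := by decide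
    have h1 : 65 ≤ c.toNat := by rw [Char.toNat]; omega
    have h2 : c.toNat ≤ 90 := by rw [Char.toNat]; omega
    have hv : (c.toNat + 32).isValidChar := by
      left; omega
    have ht : (Char.ofNat (c.toNat + 32)).toNat = c.toNat + 32 := pv_toNat_ofNat _ hv
    rw [pv_isspace_false_of _ (by omega) (by omega), pv_isspace_false_of c (by omega) (by omega)]
  · simp [h]

lemma pv_go_acc (s : List Char) : ∀ (cur : List Char) (acc : List (List Char)),
    PySem.Chars.split₀.go s cur acc = acc.reverse ++ PySem.Chars.split₀.go s cur [] := by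
  induction s with
  | nil =>
    intro cur acc
    by_cases hc : cur.isEmpty = true <;> simp [PySem.Chars.split₀.go, hc]
  | cons c rest ih =>
    intro cur acc
    by_cases hs : PySem.Chars.isspace c = true
    · by_cases hc : cur.isEmpty = true
      · simp only [PySem.Chars.split₀.go, hs, hc, if_true]
        exact ih [] acc
      · simp only [PySem.Chars.split₀.go, hs, hc, if_true, if_false, Bool.false_eq_true]
        rw [ih [] (cur.reverse :: acc), ih [] [cur.reverse]]
        simp
    · simp only [PySem.Chars.split₀.go, hs, if_false, Bool.false_eq_true]
      exact ih (c :: cur) acc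

lemma pv_go_words (s : List Char) : ∀ (cur : List Char),
    PySem.Chars.split₀.go s cur [] =
      if cur.isEmpty then pvWordsOf s
      else (cur.reverse ++ s.takeWhile pvNs) :: pvWordsOf (s.dropWhile pvNs) := by
  induction s with
  | nil =>
    intro cur
    by_cases hc : cur.isEmpty = true <;> simp [PySem.Chars.split₀.go, hc, pvWordsOf]
  | cons c rest ih =>
    intro cur
    by_cases hs : PySem.Chars.isspace c = true
    · have hns : pvNs c = false := by simp [pvNs, hs]
      by_cases hc : cur.isEmpty = true
      · simp only [PySem.Chars.split₀.go, hs, hc, if_true]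
        rw [ih []]
        simp [pvWordsOf, hs]
      · simp only [PySem.Chars.split₀.go, hs, hc, if_true, if_false, Bool.false_eq_true]
        rw [pv_go_acc, ih []]
        simp [pvWordsOf, hs, hns]
    · have hns : pvNs c = true := by simp [pvNs, hs]
      simp only [PySem.Chars.split₀.go, hs, if_false, Bool.false_eq_true]
      rw [ih (c :: cur)]
      by_cases hc : cur.isEmpty = true
      · have : cur = [] := by simpa [List.isEmpty_iff] using hc
        subst this
        simp [pvWordsOf, hs, hc]
      · simp [hc, hns]

lemma pv_split₀_eq (s : List Char) : PySem.Chars.split₀ s = pvWordsOf s := by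
  rw [PySem.Chars.split₀, pv_go_words s []]
  simp

lemma pv_takeWhile_append_all {p : Char → Bool} (u v : List Char) (hu : ∀ c ∈ u, p c = true) :
    (u ++ v).takeWhile p = u ++ v.takeWhile p := by
  induction u with
  | nil => simp
  | cons c u' ih =>
    have hc : p c = true := hu c List.mem_cons_self
    simp only [List.cons_append, List.takeWhile_cons, hc, if_true]
    rw [ih (fun d hd => hu d (List.mem_cons_of_mem _ hd))]

lemma pv_dropWhile_append_all {p : Char → Bool} (u v : List Char) (hu : ∀ c ∈ u, p c = true) :
    (u ++ v).dropWhile p = v.dropWhile p := by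
  induction u with
  | nil => simp
  | cons c u' ih =>
    have hc : p c = true := hu c List.mem_cons_self
    simp only [List.cons_append, List.dropWhile_cons, hc, if_true]
    exact ih (fun d hd => hu d (List.mem_cons_of_mem _ hd))

lemma pv_wordsOf_append (u v : List Char) (hu : ∀ c ∈ u, PySem.Chars.isspace c = false) :
    pvWordsOf (u ++ v) =
      if u.isEmpty then pvWordsOf v
      else (u ++ v.takeWhile pvNs) :: pvWordsOf (v.dropWhile pvNs) := by
  cases u with
  | nil => simp
  | cons c u' =>
    have hc : PySem.Chars.isspace c = false := hu c List.mem_cons_self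
    have hall : ∀ d ∈ u', pvNs d = true := by
      intro d hd; simp [pvNs, hu d (List.mem_cons_of_mem _ hd)]
    simp only [List.cons_append, List.isEmpty_cons, if_false, Bool.false_eq_true]
    rw [pvWordsOf]
    simp only [hc, if_false, Bool.false_eq_true]
    rw [pv_takeWhile_append_all u' v hall, pv_dropWhile_append_all u' v hall]

lemma pv_dropWhile_head {p : Char → Bool} :
    ∀ (l : List Char) (h : Char) (t : List Char), l.dropWhile p = h :: t → p h = false := by
  intro l
  induction l with
  | nil => intro h t hyp; simp at hyp
  | cons a l' ih =>
    intro h t hyp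
    by_cases ha : p a = true
    · rw [List.dropWhile_cons_of_pos ha] at hyp
      exact ih h t hyp
    · rw [List.dropWhile_cons_of_neg ha] at hyp
      cases hyp
      simpa using ha

lemma pv_main (s : List Char) : pvWordsOf (pvCl s) = (pvWordsOf s).filterMap pvG := by
  induction s using pvWordsOf.induct with
  | case1 => simp [pvCl, pvWordsOf]
  | case2 c s hs ih =>
    have h1 : pvCl (c :: s) = PySem.Chars.lowerChar c :: pvCl s := by
      simp [pvCl, hs]
    rw [h1, pvWordsOf]
    simp only [pv_lower_isspace, hs, if_true]
    rw [ih, pvWordsOf]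
    simp [hs]
  | case3 c s hs ih =>
    have hs' : PySem.Chars.isspace c = false := by
      rw [Bool.eq_false_iff]; exact hs
    set t := s.takeWhile pvNs with ht
    set r := s.dropWhile pvNs with hr
    have hsplit : (c :: s) = (c :: t) ++ r := by
      simp [ht, hr, List.takeWhile_append_dropWhile]
    have htns : ∀ d ∈ c :: t, PySem.Chars.isspace d = false := by
      intro d hd
      rcases List.mem_cons.mp hd with h | h
      · subst h; exact hs'
      · have := List.mem_takeWhile_imp h
        simpa [pvNs] using this
    have hu : pvCl (c :: t) = pvCleanTok (c :: t) := by
      rw [pvCl, pvCleanTok]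
      congr 1
      apply List.filter_congr
      intro a ha
      simp [htns a ha]
    have huns : ∀ d ∈ pvCl (c :: t), PySem.Chars.isspace d = false := by
      intro d hd
      simp only [pvCl, List.mem_map, List.mem_filter] at hd
      obtain ⟨a, ⟨ha, _⟩, rfl⟩ := hd
      rw [pv_lower_isspace]
      exact htns a ha
    have hdist : pvCl ((c :: t) ++ r) = pvCl (c :: t) ++ pvCl r := by
      rw [pvCl, pvCl, pvCl, List.filter_append, List.map_append]
    have hrtake : (pvCl r).takeWhile pvNs = [] ∧ (pvCl r).dropWhile pvNs = pvCl r := by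
      cases hrr : r with
      | nil => simp [pvCl]
      | cons h r' =>
        have hh : PySem.Chars.isspace h = true := by
          have := pv_dropWhile_head s h r' (by rw [← hr, hrr])
          simpa [pvNs] using this
        have hclr : pvCl (h :: r') = PySem.Chars.lowerChar h :: pvCl r' := by
          simp [pvCl, hh]
        have hlh : pvNs (PySem.Chars.lowerChar h) = false := by
          simp [pvNs, pv_lower_isspace, hh]
        constructor
        · rw [hclr, List.takeWhile_cons_of_neg (by simp [hlh])]
        · rw [hclr, List.dropWhile_cons_of_neg (by simp [hlh])]
    have hg : pvG (c :: t) = if (pvCl (c :: t)).isEmpty then none else some (pvCl (c :: t)) := by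
      rw [pvG, ← hu]
    calc pvWordsOf (pvCl (c :: s))
        = pvWordsOf (pvCl (c :: t) ++ pvCl r) := by rw [hsplit, hdist]
      _ = (pvWordsOf (c :: s)).filterMap pvG := by
          rw [pv_wordsOf_append _ _ huns, hrtake.1, hrtake.2, ih]
          rw [pvWordsOf]
          simp only [hs', if_false, Bool.false_eq_true, List.filterMap_cons, ← ht, ← hr, hg]
          by_cases he : (pvCl (c :: t)).isEmpty = true
          · simp [he]
          · simp [he]

lemma pv_countP_token (target : List Char) (tl : List Char) :
    ((pvG tl).map (fun x => x == target)).getD false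
      = (!(PySem.Chars.lower (tl.filter PySem.Chars.isalnum)).isEmpty
          && (PySem.Chars.lower (tl.filter PySem.Chars.isalnum) == target)) := by
  have hct : PySem.Chars.lower (tl.filter PySem.Chars.isalnum) = pvCleanTok tl := rfl
  rw [hct, pvG]
  by_cases he : (pvCleanTok tl).isEmpty = true <;> simp [he]


-- ===== VERDICT (by name: the statement is the Claim_ definition above) =====
theorem word_occurrence_spec : Claim_equal_word_occurrence := by
  intro sentence word _
  show ((PySem.List.count
      (PySem.Chars.split₀ (sentence.toList.foldl
        (fun acc c =>
          if PySem.Chars.isalnum c || PySem.Chars.isspace c then acc ++ [PySem.Chars.lowerChar c]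
          else acc) []))
      (PySem.Chars.lower word.toList) : Nat) : Int)
    = (PySem.Str.split₀ sentence).foldl
      (fun count token =>
        if !(PySem.Chars.lower (token.toList.filter PySem.Chars.isalnum)).isEmpty
            && PySem.Chars.lower (token.toList.filter PySem.Chars.isalnum) == PySem.Chars.lower word.toList
        then count + 1 else count) (0 : Int)
  rw [PySem.List.foldl_append_if, List.nil_append, pv_split₀_eq]
  have hcl : List.map PySem.Chars.lowerChar
      (List.filter (fun c => PySem.Chars.isalnum c || PySem.Chars.isspace c) sentence.toList)
      = pvCl sentence.toList := rfl
  rw [hcl, pv_main]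
  have hb : (PySem.Str.split₀ sentence).foldl
      (fun count token =>
        if !(PySem.Chars.lower (token.toList.filter PySem.Chars.isalnum)).isEmpty
            && PySem.Chars.lower (token.toList.filter PySem.Chars.isalnum) == PySem.Chars.lower word.toList
        then count + 1 else count) (0 : Int)
      = ((PySem.Str.split₀ sentence).map String.toList).foldl
      (fun count tl =>
        if !(PySem.Chars.lower (tl.filter PySem.Chars.isalnum)).isEmpty
            && (PySem.Chars.lower (tl.filter PySem.Chars.isalnum) == PySem.Chars.lower word.toList)
        then count + 1 else count) (0 : Int) := by
    rw [List.foldl_map]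
  rw [hb, PySem.Str.split₀_map_toList, pv_split₀_eq, PySem.List.foldl_if_add_one]
  rw [PySem.List.count_eq, List.count_eq_countP, List.countP_filterMap]
  simp only [pv_countP_token]
  simp
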